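-- pv_equiv track=rewrite | github.com/Colin-12/parismove-ai | services/ingestion/src/ingestion/transformers/prim_transformer.py | _short_line_code
-- ===== SOURCE A (Python) =====
-- def _short_line_code(line_id: str | None) -> str | None:
--     """Extrait un code court depuis un LineRef.
--
--     `STIF:Line::C01371:` -> `C01371`. Sert de fallback quand
--     `PublishedLineName` est absent.
--     """
--     if not line_id:
--         return None
--     parts = line_id.split(":")
--     for part in reversed(parts):
--         if part:
--             return part
--     return None
-- ===== SOURCE B (Python) =====
-- def _short_line_code(line_id):
--     """Extrait un code court depuis un LineRef (rewrite: rstrip + rsplit)."""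
--     if not line_id:
--         return None
--     trimmed = line_id.rstrip(':')
--     if not trimmed:
--         return None
--     return trimmed.rsplit(':', 1)[-1]
-- ===== Notes on version B (the rewrite author's own statement) =====
-- stated objective: idiomatic
-- what changed: Replaces the full split(':') into a parts list plus a reverse-scan loop with rstrip(':') followed by a single rsplit(':', 1) from the right.
import Mathlib
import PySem

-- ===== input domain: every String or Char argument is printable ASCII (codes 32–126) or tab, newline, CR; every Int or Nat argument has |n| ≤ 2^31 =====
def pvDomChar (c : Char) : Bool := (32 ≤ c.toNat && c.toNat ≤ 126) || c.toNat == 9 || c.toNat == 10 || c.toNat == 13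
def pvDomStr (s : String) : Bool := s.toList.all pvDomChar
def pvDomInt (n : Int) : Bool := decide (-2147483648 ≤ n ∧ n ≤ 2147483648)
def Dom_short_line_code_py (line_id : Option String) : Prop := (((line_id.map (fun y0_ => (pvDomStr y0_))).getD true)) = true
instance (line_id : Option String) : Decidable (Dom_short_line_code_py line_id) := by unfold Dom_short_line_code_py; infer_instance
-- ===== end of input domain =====

-- B replaces A's split-into-parts + reverse-scan loop by rstrip(':') followed by one rsplit(':', 1) (idiomatic decomposition, same cost).


-- ===== PORT A =====
-- the `for part in reversed(parts): if part: return part` loop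
def shortAFind : List String → Option String
  | [] => none
  | part :: rest => if part ≠ "" then some part else shortAFind rest

def short_line_code_py (line_id : Option String) : Option String :=
  match line_id with
  | none => none
  | some s =>
    if s = "" then none
    else
      -- parts = line_id.split(":"); sep ":" is nonempty so split? is always `some`
      let parts := (PySem.Str.split? s ":").getD []
      shortAFind parts.reverse

-- ===== PORT B =====
def short_line_code_py_alt (line_id : Option String) : Option String :=
  match line_id with
  | none => none
  | some s =>
    if s = "" then none
    else
      -- trimmed = line_id.rstrip(':'), ported by hand: drop trailing ':' characters (exact)
      let trimmed : List Char := (s.toList.reverse.dropWhile (· == ':')).reverse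
      if trimmed = [] then none
      else
        -- trimmed.rsplit(':', 1)[-1], ported by hand: the suffix after the last ':' (exact,
        -- since trimmed's last char is not ':')
        some (String.ofList (trimmed.reverse.takeWhile (fun c => !(c == ':'))).reverse)

-- ===== PRECONDITION & SPEC =====
def Spec_short_line_code_py (line_id : Option String) (out : Option String) : Prop := out = short_line_code_py_alt line_id
instance (line_id : Option String) (out : Option String) : Decidable (Spec_short_line_code_py line_id out) := by unfold Spec_short_line_code_py; infer_instance

-- ===== CLAIM (what is proved, stated in full; the proofs are below) =====
def Claim_equal_short_line_code_py : Prop := ∀ (line_id : Option String), Dom_short_line_code_py line_id → Spec_short_line_code_py line_id (short_line_code_py line_id)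

-- ===== LEMMAS AND PROOFS =====

-- clean recursive model of splitting on a single ':'
def splitColon : List Char → List (List Char)
  | [] => [[]]
  | c :: rest =>
    if c = ':' then [] :: splitColon rest
    else
      match splitColon rest with
      | [] => [[c]]
      | p :: ps => (c :: p) :: ps

def mapLast (f : List Char → List Char) : List (List Char) → List (List Char)
  | [] => []
  | [p] => [f p]
  | p :: q :: ps => p :: mapLast f (q :: ps)

-- first non-empty part
def fne : List (List Char) → Option (List Char)
  | [] => none
  | p :: ps => if p = [] then fne ps else some p

theorem splitColon_ne_nil (l : List Char) : splitColon l ≠ [] := by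
  cases l with
  | nil => simp [splitColon]
  | cons c rest =>
    simp only [splitColon]
    split
    · simp
    · cases h : splitColon rest <;> simp

theorem splitColon_head (l : List Char) :
    ∀ p ps, splitColon l = p :: ps → p = l.takeWhile (fun c => !(c == ':')) := by
  induction l with
  | nil => intro p ps h; simp [splitColon] at h; simp [h.1]
  | cons c rest ih =>
    intro p ps h
    by_cases hc : c = ':'
    · simp [splitColon, hc] at h
      simp [hc, h.1, List.takeWhile]
    · simp only [splitColon, if_neg hc] at h
      cases hsc : splitColon rest with
      | nil => exact absurd hsc (splitColon_ne_nil rest)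
      | cons q qs =>
        rw [hsc] at h
        have := ih q qs hsc
        simp only [List.cons.injEq] at h
        have hcb : (c == ':') = false := by simp [hc]
        simp [← h.1, this, hcb]

theorem splitOn_go_eq (fuel : Nat) (l cur : List Char) (acc : List (List Char))
    (h : l.length ≤ fuel) :
    PySem.Chars.splitOn.go [':'] fuel l cur acc =
      acc.reverse ++
        (match splitColon l with
         | [] => []
         | p :: ps => (cur.reverse ++ p) :: ps) := by
  induction fuel generalizing l cur acc with
  | zero =>
    have hl : l = [] := by cases l <;> simp_all
    subst hl
    simp [PySem.Chars.splitOn.go, splitColon]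
  | succ n ih =>
    cases l with
    | nil => simp [PySem.Chars.splitOn.go, splitColon]
    | cons c rest =>
      rw [PySem.Chars.splitOn.go]
      by_cases hc : c = ':'
      · have hp : List.isPrefixOf [':'] (c :: rest) = true := by simp [List.isPrefixOf, hc]
        simp only [hp, if_true, List.length_cons] at *
        simp only [List.length_nil, List.drop_succ_cons, List.drop_zero]
        rw [ih rest [] (cur.reverse :: acc) (by omega)]
        cases hsc : splitColon rest with
        | nil => exact absurd hsc (splitColon_ne_nil rest)
        | cons p ps => simp [splitColon, hc, hsc]
      · have hp : List.isPrefixOf [':'] (c :: rest) = false := by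
          simp [List.isPrefixOf]; exact fun h => absurd h.symm hc
        simp only [hp, Bool.false_eq_true, if_false, List.length_cons] at *
        rw [ih rest (c :: cur) acc (by omega)]
        cases hsc : splitColon rest with
        | nil => exact absurd hsc (splitColon_ne_nil rest)
        | cons p ps => simp [splitColon, hc, hsc]

theorem splitOn_eq_splitColon (l : List Char) :
    PySem.Chars.splitOn l [':'] = splitColon l := by
  unfold PySem.Chars.splitOn
  rw [splitOn_go_eq (l.length + 1) l [] [] (by omega)]
  cases hsc : splitColon l with
  | nil => exact absurd hsc (splitColon_ne_nil l)
  | cons p ps => simp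

theorem splitColon_append_last (l : List Char) (c : Char) :
    splitColon (l ++ [c]) =
      if c = ':' then splitColon l ++ [[]] else mapLast (· ++ [c]) (splitColon l) := by
  induction l with
  | nil => by_cases hc : c = ':' <;> simp [splitColon, hc, mapLast]
  | cons x t ih =>
    by_cases hx : x = ':'
    · subst hx
      simp only [List.cons_append, splitColon, ih]
      by_cases hc : c = ':'
      · simp [hc]
      · simp only [if_neg hc]
        cases hsc : splitColon t with
        | nil => exact absurd hsc (splitColon_ne_nil t)
        | cons p ps => simp [mapLast]
    · simp only [List.cons_append, splitColon, if_neg hx, ih]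
      by_cases hc : c = ':'
      · simp only [if_pos hc]
        cases hsc : splitColon t with
        | nil => exact absurd hsc (splitColon_ne_nil t)
        | cons p ps => cases ps <;> simp
      · simp only [if_neg hc]
        cases hsc : splitColon t with
        | nil => exact absurd hsc (splitColon_ne_nil t)
        | cons p ps => cases ps <;> simp [mapLast]

theorem splitColon_reverse (l : List Char) :
    splitColon l.reverse = ((splitColon l).map List.reverse).reverse := by
  induction l with
  | nil => simp [splitColon]
  | cons x t ih =>
    rw [List.reverse_cons, splitColon_append_last]
    by_cases hx : x = ':'
    · simp [hx, splitColon, ih]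
    · cases hsc : splitColon t with
      | nil => exact absurd hsc (splitColon_ne_nil t)
      | cons p ps =>
        simp only [if_neg hx, ih, splitColon, hsc, List.map_cons, List.reverse_cons]
        -- mapLast on list ++ [p.reverse]
        have : ∀ (L : List (List Char)) (q : List Char),
            mapLast (· ++ [x]) (L ++ [q]) = L ++ [q ++ [x]] := by
          intro L q
          induction L with
          | nil => simp [mapLast]
          | cons a L ihL => cases L <;> simp_all [mapLast]
        simp [this]

theorem fne_map_reverse (l : List (List Char)) :
    fne (l.map List.reverse) = (fne l).map List.reverse := by
  induction l with
  | nil => simp [fne]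
  | cons p ps ih =>
    by_cases hp : p = []
    · simp [fne, hp, ih]
    · simp [fne, hp, List.reverse_eq_nil_iff]

theorem fne_splitColon (rs : List Char) :
    fne (splitColon rs) =
      (if rs.dropWhile (· == ':') = [] then none
       else some ((rs.dropWhile (· == ':')).takeWhile (fun c => !(c == ':')))) := by
  induction rs with
  | nil => simp [splitColon, fne]
  | cons c r ih =>
    by_cases hc : c = ':'
    · simp [splitColon, hc, fne, List.dropWhile, ih]
    · simp only [splitColon, if_neg hc]
      cases hsc : splitColon r with
      | nil => exact absurd hsc (splitColon_ne_nil r)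
      | cons p ps =>
        have hp := splitColon_head r p ps hsc
        have hcb : (c == ':') = false := by simp [hc]
        simp [fne, hcb, hp]

theorem shortAFind_map (l : List (List Char)) :
    shortAFind (l.map String.ofList) = (fne l).map String.ofList := by
  induction l with
  | nil => simp [shortAFind, fne]
  | cons p ps ih =>
    by_cases hp : p = []
    · simp [shortAFind, fne, hp, ih]
    · have : String.ofList p ≠ "" := by
        simpa [← String.toList_inj] using hp
      simp [shortAFind, fne, hp, this]

-- ===== VERDICT (by name: the statement is the Claim_ definition above) =====
theorem short_line_code_py_spec : Claim_equal_short_line_code_py := by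
  intro line_id _
  unfold Spec_short_line_code_py
  cases line_id with
  | none => rfl
  | some s =>
    simp only [short_line_code_py, short_line_code_py_alt]
    by_cases hs : s = ""
    · simp [hs]
    · simp only [if_neg hs]
      have hsplit : (PySem.Str.split? s ":").getD [] =
          (splitColon s.toList).map String.ofList := by
        simp [PySem.Str.split?, PySem.Chars.split?, splitOn_eq_splitColon]
      rw [hsplit, ← List.map_reverse, shortAFind_map]
      -- rewrite the A-side through the reversed string
      have hrev : (splitColon s.toList).reverse =
          (splitColon s.toList.reverse).map List.reverse := by
        rw [splitColon_reverse, List.map_reverse, List.map_map]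
        simp
      rw [hrev, fne_map_reverse, fne_splitColon]
      set d := s.toList.reverse.dropWhile (· == ':') with hd
      by_cases hdn : d = []
      · simp [hdn]
      · simp [hdn, List.reverse_eq_nil_iff]
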